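-- pv_equiv track=rewrite | github.com/shivamkalra111/ledgermind | core/schema.py | get_sdm_field
-- ===== SOURCE A (Python) =====
-- from typing import Optional, List
--
-- HEADER_ALIASES = {
--     # Invoice fields
--     "invoice_number": ["inv no", "invoice no", "bill no", "voucher no", "doc no"],
--     "invoice_date": ["inv date", "date", "bill date", "doc date", "voucher date"],
--     "party_name": ["customer", "vendor", "party", "name", "customer name", "vendor name", "supplier"],
--     "party_gstin": ["gstin", "gst no", "gst number", "gstin/uin"],
--
--     # Value fields
--     "taxable_value": ["taxable", "taxable amt", "taxable amount", "base amount", "net amount"],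
--     "total_value": ["total", "total amt", "total amount", "gross amount", "invoice value", "bill amount"],
--
--     # Tax fields
--     "cgst_amount": ["cgst", "cgst amt", "central tax"],
--     "sgst_amount": ["sgst", "sgst amt", "state tax"],
--     "igst_amount": ["igst", "igst amt", "integrated tax"],
--
--     # Bank fields
--     "credit_amount": ["credit", "cr", "deposit", "receipt"],
--     "debit_amount": ["debit", "dr", "withdrawal", "payment"],
--     "balance": ["balance", "running balance", "closing balance"],
--
--     # Common fields
--     "description": ["desc", "particulars", "narration", "details", "item"],
--     "hsn_code": ["hsn", "hsn code", "sac", "sac code"],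
--     "quantity": ["qty", "quantity", "units"],
--     "rate": ["rate", "price", "unit price"],
-- }
--
-- def get_sdm_field(header: str) -> Optional[str]:
--     """Try to match a header to a Standard Data Model field."""
--     header_lower = header.lower().strip()
--
--     for sdm_field, aliases in HEADER_ALIASES.items():
--         if header_lower == sdm_field:
--             return sdm_field
--         if header_lower in aliases:
--             return sdm_field
--
--     return None
-- ===== SOURCE B (Python) =====
-- from typing import Optional
--
-- # Flat lookup table: each standard field name and each alias maps to its field.
-- # One dict literal, first occurrence kept (no key belongs to two fields), so a
-- # call is a single hash lookup instead of a scan over HEADER_ALIASES.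
-- SDM_LOOKUP = {
--     "invoice_number": "invoice_number",
--     "inv no": "invoice_number",
--     "invoice no": "invoice_number",
--     "bill no": "invoice_number",
--     "voucher no": "invoice_number",
--     "doc no": "invoice_number",
--     "invoice_date": "invoice_date",
--     "inv date": "invoice_date",
--     "date": "invoice_date",
--     "bill date": "invoice_date",
--     "doc date": "invoice_date",
--     "voucher date": "invoice_date",
--     "party_name": "party_name",
--     "customer": "party_name",
--     "vendor": "party_name",
--     "party": "party_name",
--     "name": "party_name",
--     "customer name": "party_name",
--     "vendor name": "party_name",
--     "supplier": "party_name",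
--     "party_gstin": "party_gstin",
--     "gstin": "party_gstin",
--     "gst no": "party_gstin",
--     "gst number": "party_gstin",
--     "gstin/uin": "party_gstin",
--     "taxable_value": "taxable_value",
--     "taxable": "taxable_value",
--     "taxable amt": "taxable_value",
--     "taxable amount": "taxable_value",
--     "base amount": "taxable_value",
--     "net amount": "taxable_value",
--     "total_value": "total_value",
--     "total": "total_value",
--     "total amt": "total_value",
--     "total amount": "total_value",
--     "gross amount": "total_value",
--     "invoice value": "total_value",
--     "bill amount": "total_value",
--     "cgst_amount": "cgst_amount",
--     "cgst": "cgst_amount",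
--     "cgst amt": "cgst_amount",
--     "central tax": "cgst_amount",
--     "sgst_amount": "sgst_amount",
--     "sgst": "sgst_amount",
--     "sgst amt": "sgst_amount",
--     "state tax": "sgst_amount",
--     "igst_amount": "igst_amount",
--     "igst": "igst_amount",
--     "igst amt": "igst_amount",
--     "integrated tax": "igst_amount",
--     "credit_amount": "credit_amount",
--     "credit": "credit_amount",
--     "cr": "credit_amount",
--     "deposit": "credit_amount",
--     "receipt": "credit_amount",
--     "debit_amount": "debit_amount",
--     "debit": "debit_amount",
--     "dr": "debit_amount",
--     "withdrawal": "debit_amount",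
--     "payment": "debit_amount",
--     "balance": "balance",
--     "running balance": "balance",
--     "closing balance": "balance",
--     "description": "description",
--     "desc": "description",
--     "particulars": "description",
--     "narration": "description",
--     "details": "description",
--     "item": "description",
--     "hsn_code": "hsn_code",
--     "hsn": "hsn_code",
--     "hsn code": "hsn_code",
--     "sac": "hsn_code",
--     "sac code": "hsn_code",
--     "quantity": "quantity",
--     "qty": "quantity",
--     "units": "quantity",
--     "rate": "rate",
--     "price": "rate",
--     "unit price": "rate",
-- }
--
-- def get_sdm_field(header):
--     """Try to match a header to a Standard Data Model field."""
--     return SDM_LOOKUP.get(header.lower().strip())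
-- ===== Notes on version B (the rewrite author's own statement) =====
-- stated objective: idiomatic
-- what changed: Replaced the per-call scan over the grouped HEADER_ALIASES table (name equality plus alias-list membership for each field) with one flat literal dict mapping every field name and alias to its field, so a call is a single dict.get lookup.
import Mathlib
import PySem

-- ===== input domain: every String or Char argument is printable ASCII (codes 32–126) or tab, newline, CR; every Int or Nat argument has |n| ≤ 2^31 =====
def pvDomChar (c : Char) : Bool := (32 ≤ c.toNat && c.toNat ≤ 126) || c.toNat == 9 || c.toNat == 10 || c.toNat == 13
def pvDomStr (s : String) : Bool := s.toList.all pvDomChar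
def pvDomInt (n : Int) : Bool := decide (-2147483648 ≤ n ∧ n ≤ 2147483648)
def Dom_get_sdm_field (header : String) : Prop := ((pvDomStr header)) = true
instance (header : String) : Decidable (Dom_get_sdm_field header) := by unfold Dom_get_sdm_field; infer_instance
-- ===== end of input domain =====

-- B replaces A's per-call scan over the grouped HEADER_ALIASES table with one flat
-- literal lookup dict (field names and aliases as keys), so a call is a single lookup.

-- ===== PORT A =====
-- HEADER_ALIASES as an association list in source order
def headerAliases : List (String × List String) :=
  [ ("invoice_number", ["inv no", "invoice no", "bill no", "voucher no", "doc no"]),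
    ("invoice_date", ["inv date", "date", "bill date", "doc date", "voucher date"]),
    ("party_name", ["customer", "vendor", "party", "name", "customer name", "vendor name", "supplier"]),
    ("party_gstin", ["gstin", "gst no", "gst number", "gstin/uin"]),
    ("taxable_value", ["taxable", "taxable amt", "taxable amount", "base amount", "net amount"]),
    ("total_value", ["total", "total amt", "total amount", "gross amount", "invoice value", "bill amount"]),
    ("cgst_amount", ["cgst", "cgst amt", "central tax"]),
    ("sgst_amount", ["sgst", "sgst amt", "state tax"]),
    ("igst_amount", ["igst", "igst amt", "integrated tax"]),
    ("credit_amount", ["credit", "cr", "deposit", "receipt"]),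
    ("debit_amount", ["debit", "dr", "withdrawal", "payment"]),
    ("balance", ["balance", "running balance", "closing balance"]),
    ("description", ["desc", "particulars", "narration", "details", "item"]),
    ("hsn_code", ["hsn", "hsn code", "sac", "sac code"]),
    ("quantity", ["qty", "quantity", "units"]),
    ("rate", ["rate", "price", "unit price"]) ]

-- A's for-loop over HEADER_ALIASES.items() with its two branches, in order
def findField : List (String × List String) -> String -> Option String
  | [], _ => none
  | (sdm_field, aliases) :: rest, header_lower =>
    if header_lower = sdm_field then some sdm_field
    else if aliases.contains header_lower then some sdm_field
    else findField rest header_lower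

def get_sdm_field (header : String) : Option String :=
  findField headerAliases (PySem.Str.strip (PySem.Str.lower header))

-- ===== PORT B =====
-- Source B's SDM_LOOKUP dict literal (all 80 keys are distinct, as in Source B)
def sdmLookup : PySem.Dict String String :=
  PySem.Dict.mk [
    ("invoice_number", "invoice_number"), 
    ("inv no", "invoice_number"), 
    ("invoice no", "invoice_number"), 
    ("bill no", "invoice_number"), 
    ("voucher no", "invoice_number"), 
    ("doc no", "invoice_number"), 
    ("invoice_date", "invoice_date"), 
    ("inv date", "invoice_date"), 
    ("date", "invoice_date"), 
    ("bill date", "invoice_date"), 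
    ("doc date", "invoice_date"), 
    ("voucher date", "invoice_date"), 
    ("party_name", "party_name"), 
    ("customer", "party_name"), 
    ("vendor", "party_name"), 
    ("party", "party_name"), 
    ("name", "party_name"), 
    ("customer name", "party_name"), 
    ("vendor name", "party_name"), 
    ("supplier", "party_name"), 
    ("party_gstin", "party_gstin"), 
    ("gstin", "party_gstin"), 
    ("gst no", "party_gstin"), 
    ("gst number", "party_gstin"), 
    ("gstin/uin", "party_gstin"), 
    ("taxable_value", "taxable_value"), 
    ("taxable", "taxable_value"), 
    ("taxable amt", "taxable_value"), 
    ("taxable amount", "taxable_value"), 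
    ("base amount", "taxable_value"), 
    ("net amount", "taxable_value"), 
    ("total_value", "total_value"), 
    ("total", "total_value"), 
    ("total amt", "total_value"), 
    ("total amount", "total_value"), 
    ("gross amount", "total_value"), 
    ("invoice value", "total_value"), 
    ("bill amount", "total_value"), 
    ("cgst_amount", "cgst_amount"), 
    ("cgst", "cgst_amount"), 
    ("cgst amt", "cgst_amount"), 
    ("central tax", "cgst_amount"), 
    ("sgst_amount", "sgst_amount"), 
    ("sgst", "sgst_amount"), 
    ("sgst amt", "sgst_amount"), 
    ("state tax", "sgst_amount"), 
    ("igst_amount", "igst_amount"), 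
    ("igst", "igst_amount"), 
    ("igst amt", "igst_amount"), 
    ("integrated tax", "igst_amount"), 
    ("credit_amount", "credit_amount"), 
    ("credit", "credit_amount"), 
    ("cr", "credit_amount"), 
    ("deposit", "credit_amount"), 
    ("receipt", "credit_amount"), 
    ("debit_amount", "debit_amount"), 
    ("debit", "debit_amount"), 
    ("dr", "debit_amount"), 
    ("withdrawal", "debit_amount"), 
    ("payment", "debit_amount"), 
    ("balance", "balance"), 
    ("running balance", "balance"), 
    ("closing balance", "balance"), 
    ("description", "description"), 
    ("desc", "description"), 
    ("particulars", "description"), 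
    ("narration", "description"), 
    ("details", "description"), 
    ("item", "description"), 
    ("hsn_code", "hsn_code"), 
    ("hsn", "hsn_code"), 
    ("hsn code", "hsn_code"), 
    ("sac", "hsn_code"), 
    ("sac code", "hsn_code"), 
    ("quantity", "quantity"), 
    ("qty", "quantity"), 
    ("units", "quantity"), 
    ("rate", "rate"), 
    ("price", "rate"), 
    ("unit price", "rate") 

  ]

def get_sdm_field_alt (header : String) : Option String :=
  sdmLookup.get? (PySem.Str.strip (PySem.Str.lower header))

-- ===== PRECONDITION & SPEC =====
def Spec_get_sdm_field (header : String) (out : Option String) : Prop := out = get_sdm_field_alt header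
instance (header : String) (out : Option String) : Decidable (Spec_get_sdm_field header out) := by unfold Spec_get_sdm_field; infer_instance

-- ===== CLAIM =====
def Claim_equal_get_sdm_field : Prop := ∀ (header : String), Dom_get_sdm_field header → Spec_get_sdm_field header (get_sdm_field header)

-- ===== LEMMAS AND PROOFS =====

-- the flat table Source B writes out, as a function of A's grouped table:
-- field first, then its aliases in order (an alias equal to its own field name is
-- dropped, as the dict literal keeps one entry per key)
def pvFlat (t : List (String × List String)) : List (String × String) :=
  t.flatMap (fun p => (p.1, p.1) :: (p.2.filter (fun a => a ≠ p.1)).map (fun a => (a, p.1)))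

theorem pvFlat_headerAliases : sdmLookup = PySem.Dict.mk (pvFlat headerAliases) := by decide

theorem get?_alias_block (as : List String) (f : String) (L : List (String × String)) (s : String) :
    (PySem.Dict.mk ((as.map (fun a => (a, f))) ++ L)).get? s =
      if as.contains s then some f else (PySem.Dict.mk L).get? s := by
  induction as with
  | nil => simp
  | cons a as' ih =>
    simp only [List.map_cons, List.cons_append, PySem.Dict.get?_mk_cons, ih, List.contains_cons]
    by_cases h : a = s
    · subst h; simp
    · have h' : ¬ s = a := fun e => h e.symm
      simp [h, h']

theorem get?_pvFlat (t : List (String × List String)) (s : String) :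
    (PySem.Dict.mk (pvFlat t)).get? s = findField t s := by
  induction t with
  | nil => simp [pvFlat, findField, PySem.Dict.get?]
  | cons p rest ih =>
    obtain ⟨f, as⟩ := p
    rw [show pvFlat ((f, as) :: rest)
          = (f, f) :: (((as.filter (fun a => a ≠ f)).map (fun a => (a, f))) ++ pvFlat rest)
        from rfl]
    rw [PySem.Dict.get?_mk_cons, get?_alias_block, ih, findField]
    by_cases hf : s = f
    · subst hf; simp
    · have hf' : ¬ f = s := fun e => hf e.symm
      simp [hf, hf']

-- ===== VERDICT =====
theorem get_sdm_field_spec : Claim_equal_get_sdm_field := by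
  intro header _
  unfold Spec_get_sdm_field get_sdm_field get_sdm_field_alt
  rw [pvFlat_headerAliases, get?_pvFlat]
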